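-- pv_equiv track=rewrite | github.com/likai-xixi/sili-jian-orchestrator | scripts/replan_change_request.py | append_note
-- ===== SOURCE A (Python) =====
-- def append_note(markdown: str, note: str) -> str:
--     lines = markdown.splitlines()
--     output: list[str] = []
--     inserted = False
--     in_target = False
--     for line in lines:
--         stripped = line.strip()
--         if stripped.startswith("## "):
--             if in_target and not inserted:
--                 output.append(f"- {note}")
--                 inserted = True
--             in_target = stripped[3:].strip().lower() == "notes for next round"
--             output.append(line)
--             continue
--         output.append(line)
--         if in_target and stripped.lower() == "- none":
--             output[-1] = f"- {note}"
--             inserted = True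
--             in_target = False
--     if not inserted:
--         if output and output[-1] != "":
--             output.append("")
--         output.extend(["## Notes For Next Round", "", f"- {note}"])
--     return "\n".join(output).rstrip() + "\n"
-- ===== SOURCE B (Python) =====
-- def _is_heading(line: str) -> bool:
--     return line.strip().startswith("## ")
--
--
-- def _is_target(line: str) -> bool:
--     return line.strip()[3:].strip().lower() == "notes for next round"
--
--
-- def _is_none_item(line: str) -> bool:
--     return line.strip().lower() == "- none"
--
--
-- def _split_blocks(lines: list) -> tuple:
--     """Split lines into (preamble, blocks); each block = (heading line, body lines)."""
--     pre = []
--     k = 0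
--     while k < len(lines) and not _is_heading(lines[k]):
--         pre.append(lines[k])
--         k += 1
--     blocks = []
--     while k < len(lines):
--         head = lines[k]
--         k += 1
--         body = []
--         while k < len(lines) and not _is_heading(lines[k]):
--             body.append(lines[k])
--             k += 1
--         blocks.append((head, body))
--     return pre, blocks
--
--
-- def _replace_none(body: list, note: str) -> tuple:
--     """Replace the first '- None' placeholder of body with '- {note}'."""
--     for t, line in enumerate(body):
--         if _is_none_item(line):
--             return body[:t] + [f"- {note}"] + body[t + 1:], True
--     return body, False
--
--
-- def append_note(markdown: str, note: str) -> str: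
--     pre, blocks = _split_blocks(markdown.splitlines())
--     done = False
--     out_blocks = []
--     for head, body in blocks:
--         if _is_target(head):
--             new_body, replaced = _replace_none(body, note)
--             if replaced:
--                 body = new_body
--                 done = True
--             elif not done:
--                 body = body + [f"- {note}"]
--                 done = True
--         out_blocks.append((head, body))
--     output = pre + [line for head, body in out_blocks for line in [head] + body]
--     if not done:
--         if output and output[-1] != "":
--             output.append("")
--         output.extend(["## Notes For Next Round", "", f"- {note}"])
--     return "\n".join(output).rstrip() + "\n"
-- ===== Notes on version B (the rewrite author's own statement) =====
-- stated objective: alternative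
-- what changed: B splits the document into a preamble plus heading-delimited blocks, edits the target block (replace '- None' or append the note), and re-flattens, instead of A's single-pass loop with inserted/in_target flags.
-- intended difference: When the first 'Notes For Next Round' section is the last section of the document and contains no '- None' placeholder, A appends a whole duplicate '## Notes For Next Round' section at the end (it only inserts upon reaching a following heading), while B appends the note inside the existing section, which is the intended behaviour. — e.g. on append_note("## Notes For Next Round", "x"): A returns "## Notes For Next Round\n\n## Notes For Next Round\n\n- x\n", B returns "## Notes For Next Round\n- x\n"
import Mathlib
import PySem

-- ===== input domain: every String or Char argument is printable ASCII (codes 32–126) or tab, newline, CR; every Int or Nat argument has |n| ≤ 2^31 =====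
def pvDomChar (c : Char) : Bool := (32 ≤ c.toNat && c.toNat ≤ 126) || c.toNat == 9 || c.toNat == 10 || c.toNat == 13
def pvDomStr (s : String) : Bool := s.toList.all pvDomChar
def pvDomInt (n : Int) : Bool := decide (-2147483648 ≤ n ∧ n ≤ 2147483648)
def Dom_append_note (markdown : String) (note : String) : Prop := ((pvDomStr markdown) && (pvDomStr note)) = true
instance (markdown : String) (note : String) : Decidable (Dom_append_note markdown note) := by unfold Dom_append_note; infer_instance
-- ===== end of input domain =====

set_option maxHeartbeats 1600000


-- B re-implements A by a different decomposition (split into heading-delimited blocks, edit the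
-- first target block, re-flatten) instead of A's single-pass three-flag state machine; objective:
-- alternative. On one corner (target section is last and has no '- None') B's value intentionally
-- differs from A's — see D_append_note below.

-- ===== PORT A =====
-- one step of A's for-loop; state = (output, inserted, in_target)
def pvStepA (note : String) (st : List String × Bool × Bool) (line : String) :
    List String × Bool × Bool :=
  let out := st.1
  let inserted := st.2.1
  let in_target := st.2.2
  let stripped := PySem.Str.strip line
  if PySem.Str.startswith stripped "## " then
    let out1 := if in_target && !inserted then out ++ ["- " ++ note] else out
    let inserted1 := if in_target && !inserted then true else inserted
    let in_target1 :=
      PySem.Str.lower (PySem.Str.strip (PySem.Str.slice stripped (some 3) none))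
        == "notes for next round"
    (out1 ++ [line], inserted1, in_target1)
  else
    let out1 := out ++ [line]
    if in_target && (PySem.Str.lower stripped == "- none") then
      -- output[-1] = f"- {note}"
      (out1.dropLast ++ ["- " ++ note], true, false)
    else
      (out1, inserted, in_target)

def append_note (markdown : String) (note : String) : String :=
  let lines := PySem.Str.splitlines markdown
  let res := lines.foldl (pvStepA note) ([], false, false)
  let output :=
    if !res.2.1 then
      (if res.1 ≠ [] ∧ res.1.getLast? ≠ some "" then res.1 ++ [""] else res.1)
        ++ ["## Notes For Next Round", "", "- " ++ note]
    else res.1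
  PySem.Str.rstrip (PySem.Str.join "\n" output) ++ "\n"

-- ===== PORT B =====
def pvIsHeading (line : String) : Bool :=
  PySem.Str.startswith (PySem.Str.strip line) "## "

def pvIsTarget (line : String) : Bool :=
  PySem.Str.lower (PySem.Str.strip (PySem.Str.slice (PySem.Str.strip line) (some 3) none))
    == "notes for next round"

def pvIsNoneItem (line : String) : Bool :=
  PySem.Str.lower (PySem.Str.strip line) == "- none"

-- the inner while-loops of _split_blocks are takeWhile/dropWhile scans; the index k of the
-- Python loop bounds the scan, so the recursion runs on a fuel of ls.length (always sufficient)
def pvSplitBlocksF : Nat → List String → List (String × List String)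
  | 0, _ => []
  | _ + 1, [] => []
  | f + 1, h :: rest =>
    (h, rest.takeWhile (fun l => !pvIsHeading l)) ::
      pvSplitBlocksF f (rest.dropWhile (fun l => !pvIsHeading l))

def pvSplitBlocks (ls : List String) : List (String × List String) :=
  pvSplitBlocksF ls.length ls

-- _replace_none: replace the first '- None' placeholder, report whether one was found
def pvReplaceNone (note : String) : List String → List String × Bool
  | [] => ([], false)
  | l :: ls =>
    if pvIsNoneItem l then (("- " ++ note) :: ls, true)
    else
      let r := pvReplaceNone note ls
      (l :: r.1, r.2)

-- the for-loop over blocks; done flag threaded through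
def pvProcB (note : String) (done : Bool) :
    List (String × List String) → List (String × List String) × Bool
  | [] => ([], done)
  | (h, body) :: bs =>
    if pvIsTarget h then
      let rp := pvReplaceNone note body
      if rp.2 then
        let r := pvProcB note true bs
        ((h, rp.1) :: r.1, r.2)
      else if !done then
        let r := pvProcB note true bs
        ((h, body ++ ["- " ++ note]) :: r.1, r.2)
      else
        let r := pvProcB note done bs
        ((h, body) :: r.1, r.2)
    else
      let r := pvProcB note done bs
      ((h, body) :: r.1, r.2)

def append_note_alt (markdown : String) (note : String) : String :=
  let lines := PySem.Str.splitlines markdown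
  let pre := lines.takeWhile (fun l => !pvIsHeading l)
  let blocks := pvSplitBlocks (lines.dropWhile (fun l => !pvIsHeading l))
  let res := pvProcB note false blocks
  let output := pre ++ res.1.flatMap (fun b => b.1 :: b.2)
  let output :=
    if !res.2 then
      (if output ≠ [] ∧ output.getLast? ≠ some "" then output ++ [""] else output)
        ++ ["## Notes For Next Round", "", "- " ++ note]
    else output
  PySem.Str.rstrip (PySem.Str.join "\n" output) ++ "\n"

-- ===== PRECONDITION & SPEC =====
-- When the first 'Notes For Next Round' section is the last section of the document and contains
-- no '- None' placeholder, A appends a whole duplicate '## Notes For Next Round' section at the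
-- end, while B appends the note inside the existing section — the intended behaviour.
-- D-side predicates, phrased on the character lists (PySem.Chars), independent of the ports
def pvDHead (l : String) : Bool :=
  PySem.Chars.startswith (PySem.Chars.strip l.toList) "## ".toList
def pvDTarget (l : String) : Bool :=
  pvDHead l &&
    (PySem.Chars.lower (PySem.Chars.strip
        (PySem.Chars.slice (PySem.Chars.strip l.toList) (some 3) none))
      == "notes for next round".toList)
def pvDNone (l : String) : Bool :=
  PySem.Chars.lower (PySem.Chars.strip l.toList) == "- none".toList

def D_append_note (markdown : String) (note : String) : Prop :=
  let tl := (PySem.Str.splitlines markdown).dropWhile (fun l => !pvDTarget l)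
  tl ≠ [] ∧ tl.tail.all (fun l => !pvDHead l) = true ∧
    tl.tail.all (fun l => !pvDNone l) = true
instance (markdown : String) (note : String) : Decidable (D_append_note markdown note) := by
  unfold D_append_note; infer_instance

def Spec_append_note (markdown : String) (note : String) (out : String) : Prop :=
  ¬ D_append_note markdown note → out = append_note_alt markdown note
instance (markdown : String) (note : String) (out : String) : Decidable (Spec_append_note markdown note out) := by unfold Spec_append_note; infer_instance

def pvDiffWitness_append_note : String × String := ("## Notes For Next Round", "x")
def pvDiffWitnessOut_append_note : String × String :=
  ("## Notes For Next Round\n\n## Notes For Next Round\n\n- x\n",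
   "## Notes For Next Round\n- x\n")

-- ===== CLAIM (what is proved, stated in full; the proofs are below) =====
def Claim_unchanged_append_note : Prop := ∀ (markdown : String) (note : String), Dom_append_note markdown note → Spec_append_note markdown note (append_note markdown note)
def Claim_exact_append_note : Prop := ∀ (markdown : String) (note : String), Dom_append_note markdown note → D_append_note markdown note → append_note markdown note ≠ append_note_alt markdown note
def Claim_changed_append_note : Prop := Dom_append_note (pvDiffWitness_append_note.1) (pvDiffWitness_append_note.2) ∧ D_append_note (pvDiffWitness_append_note.1) (pvDiffWitness_append_note.2) ∧ append_note (pvDiffWitness_append_note.1) (pvDiffWitness_append_note.2) = pvDiffWitnessOut_append_note.1 ∧ append_note_alt (pvDiffWitness_append_note.1) (pvDiffWitness_append_note.2) = pvDiffWitnessOut_append_note.2 ∧ pvDiffWitnessOut_append_note.1 ≠ pvDiffWitnessOut_append_note.2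

-- ===== LEMMAS AND PROOFS =====

-- well-founded twin of pvSplitBlocks, convenient for induction
def pvSplitBlocksW (ls : List String) : List (String × List String) :=
  match ls with
  | [] => []
  | h :: rest =>
    (h, rest.takeWhile (fun l => !pvIsHeading l)) ::
      pvSplitBlocksW (rest.dropWhile (fun l => !pvIsHeading l))
termination_by ls.length
decreasing_by
  simp only [List.length_cons]
  exact Nat.lt_succ_of_le (rest.dropWhile_sublist _).length_le

lemma splitBlocksF_fuel (f : Nat) : ∀ (ls : List String), ls.length ≤ f →
    pvSplitBlocksF f ls = pvSplitBlocksW ls := by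
  induction f with
  | zero =>
    intro ls h
    have : ls = [] := List.eq_nil_of_length_eq_zero (Nat.le_zero.mp h)
    subst this
    rw [pvSplitBlocksW]
    rfl
  | succ f ih =>
    intro ls h
    cases ls with
    | nil => rw [pvSplitBlocksW]; rfl
    | cons x rest =>
      rw [pvSplitBlocksW, pvSplitBlocksF]
      have hlen : (rest.dropWhile (fun l => !pvIsHeading l)).length ≤ f := by
        have h1 := (rest.dropWhile_sublist (fun l => !pvIsHeading l)).length_le
        have h2 : rest.length ≤ f := by simpa using Nat.le_of_succ_le_succ h
        omega
      rw [ih _ hlen]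

lemma splitBlocks_eq_W (ls : List String) : pvSplitBlocks ls = pvSplitBlocksW ls :=
  splitBlocksF_fuel ls.length ls le_rfl

-- A's block-level behaviour, to be related to the fold: like pvProcB but with A's quirk
-- (the note is only appended to a '- None'-less target block when another block follows)
def pvProcA (note : String) (done : Bool) :
    List (String × List String) → List (String × List String) × Bool
  | [] => ([], done)
  | (h, body) :: bs =>
    if pvIsTarget h then
      let rp := pvReplaceNone note body
      if rp.2 then
        let r := pvProcA note true bs
        ((h, rp.1) :: r.1, r.2)
      else if !done && !bs.isEmpty then
        let r := pvProcA note true bs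
        ((h, body ++ ["- " ++ note]) :: r.1, r.2)
      else
        let r := pvProcA note done bs
        ((h, body) :: r.1, r.2)
    else
      let r := pvProcA note done bs
      ((h, body) :: r.1, r.2)

-- A's final in_target flag after running through a list of blocks
def pvFinInt (note : String) (int : Bool) (bs : List (String × List String)) : Bool :=
  bs.foldl (fun _ b => if pvIsTarget b.1 then !(pvReplaceNone note b.2).2 else false) int

lemma finInt_cons (note : String) (int : Bool) (h : String) (body : List String)
    (bs : List (String × List String)) :
    pvFinInt note int ((h, body) :: bs) =
      pvFinInt note (if pvIsTarget h then !(pvReplaceNone note body).2 else false) bs := by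
  rw [pvFinInt, pvFinInt, List.foldl_cons]

def pvFlatten (bs : List (String × List String)) : List String :=
  bs.flatMap (fun b => b.1 :: b.2)

def pvWF (bs : List (String × List String)) : Prop :=
  ∀ b ∈ bs, pvIsHeading b.1 = true ∧ ∀ l ∈ b.2, pvIsHeading l = false

-- A's quirk region at block level: the first target block is last and has no '- None'
def pvQuirk : List (String × List String) → Bool
  | [] => false
  | (h, body) :: bs =>
    if pvIsTarget h then (body.all (fun l => !pvIsNoneItem l)) && bs.isEmpty
    else pvQuirk bs

-- one non-heading line, in_target = false: just appended
lemma stepA_notarget (note : String) (out : List String) (ins : Bool) (l : String)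
    (hl : pvIsHeading l = false) :
    pvStepA note (out, ins, false) l = (out ++ [l], ins, false) := by
  simp [pvStepA, pvIsHeading] at hl ⊢
  simp [hl]

-- folding A's step over a heading-free body with in_target = false
lemma foldA_body_false (note : String) (body : List String)
    (hb : ∀ l ∈ body, pvIsHeading l = false) (out : List String) (ins : Bool) :
    body.foldl (pvStepA note) (out, ins, false) = (out ++ body, ins, false) := by
  induction body generalizing out with
  | nil => simp
  | cons l ls ih =>
    rw [List.foldl_cons, stepA_notarget note out ins l (hb l (by simp))]
    rw [ih (fun x hx => hb x (by simp [hx])) (out ++ [l])]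
    simp

-- folding A's step over a heading-free body with in_target = true
lemma foldA_body_true (note : String) (body : List String)
    (hb : ∀ l ∈ body, pvIsHeading l = false) (out : List String) (ins : Bool) :
    body.foldl (pvStepA note) (out, ins, true) =
      (out ++ (pvReplaceNone note body).1,
       ins || (pvReplaceNone note body).2, !(pvReplaceNone note body).2) := by
  induction body generalizing out ins with
  | nil => simp [pvReplaceNone]
  | cons l ls ih =>
    have hl : pvIsHeading l = false := hb l (by simp)
    have hls : ∀ x ∈ ls, pvIsHeading x = false := fun x hx => hb x (by simp [hx])
    rw [List.foldl_cons]
    by_cases hn : pvIsNoneItem l = true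
    · have hstep : pvStepA note (out, ins, true) l = (out ++ ["- " ++ note], true, false) := by
        simp [pvStepA, pvIsHeading] at hl ⊢
        simp [hl]
        simp [pvIsNoneItem] at hn
        simp [hn]
      rw [hstep, foldA_body_false note ls hls]
      simp [pvReplaceNone, hn]
    · have hn' : pvIsNoneItem l = false := by simpa using hn
      have hstep : pvStepA note (out, ins, true) l = (out ++ [l], ins, true) := by
        simp [pvStepA, pvIsHeading] at hl ⊢
        simp [hl]
        simp [pvIsNoneItem] at hn'
        simp [hn']
      rw [hstep, ih hls (out ++ [l]) ins]
      simp [pvReplaceNone, hn']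

-- A's step at a heading line
lemma stepA_heading (note : String) (out : List String) (ins int : Bool) (h : String)
    (hh : pvIsHeading h = true) :
    pvStepA note (out, ins, int) h =
      ((if int && !ins then out ++ ["- " ++ note] else out) ++ [h],
       ins || int, pvIsTarget h) := by
  simp [pvStepA, pvIsHeading] at hh ⊢
  simp [hh, pvIsTarget]
  cases int <;> cases ins <;> simp

-- if nothing was replaced the body is returned unchanged
lemma replaceNone_false (note : String) (body : List String)
    (h : (pvReplaceNone note body).2 = false) : (pvReplaceNone note body).1 = body := by
  induction body with
  | nil => simp [pvReplaceNone]
  | cons l ls ih =>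
    by_cases hn : pvIsNoneItem l = true
    · simp [pvReplaceNone, hn] at h
    · simp [pvReplaceNone, hn] at h ⊢
      exact ih h

-- the replaced flag is exactly "some '- None' line exists"
lemma replaceNone_snd (note : String) (body : List String) :
    (pvReplaceNone note body).2 = !(body.all (fun l => !pvIsNoneItem l)) := by
  induction body with
  | nil => simp [pvReplaceNone]
  | cons l ls ih =>
    by_cases hn : pvIsNoneItem l = true
    · simp [pvReplaceNone, hn]
    · simp only [Bool.not_eq_true] at hn
      simp [pvReplaceNone, hn, ih]

-- main correspondence: A's fold over flattened blocks vs A's block-level processing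
lemma foldA_blocks (note : String) (bs : List (String × List String)) (hwf : pvWF bs) :
    ∀ (out : List String) (ins int : Bool),
      (pvFlatten bs).foldl (pvStepA note) (out, ins, int) =
        (out ++ (if int && !ins && !bs.isEmpty then ["- " ++ note] else [])
             ++ pvFlatten (pvProcA note (ins || (int && !bs.isEmpty)) bs).1,
         (pvProcA note (ins || (int && !bs.isEmpty)) bs).2,
         pvFinInt note int bs) := by
  induction bs with
  | nil =>
    intro out ins int
    rw [pvProcA]
    show (out, ins, int) = (out ++ (if int && !ins && !true then ["- " ++ note] else [])
      ++ pvFlatten [], ins || (int && !true), int)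
    cases int <;> cases ins <;> simp [pvFlatten]
  | cons b bs ih =>
    intro out ins int
    obtain ⟨h, body⟩ := b
    have hh : pvIsHeading h = true := (hwf (h, body) (by simp)).1
    have hbody : ∀ l ∈ body, pvIsHeading l = false := (hwf (h, body) (by simp)).2
    have hwf' : pvWF bs := fun x hx => hwf x (by simp [hx])
    have hflat : pvFlatten ((h, body) :: bs) = h :: (body ++ pvFlatten bs) := by
      simp [pvFlatten]
    rw [hflat, List.foldl_cons, stepA_heading note out ins int h hh, List.foldl_append]
    cases ht : pvIsTarget h with
    | false =>
      rw [foldA_body_false note body hbody _ (ins || int), ih hwf' _ _ false]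
      cases int <;> cases ins <;>
        simp [pvProcA, finInt_cons, pvFlatten, ht]
    | true =>
      rw [foldA_body_true note body hbody _ (ins || int)]
      cases hf : (pvReplaceNone note body).2 with
      | true =>
        simp only [Bool.or_true, Bool.not_true]
        rw [ih hwf' _ _ false]
        cases int <;> cases ins <;>
          simp [pvProcA, finInt_cons, pvFlatten, ht, hf]
      | false =>
        rw [replaceNone_false note body hf]
        simp only [Bool.or_false, Bool.not_false]
        rw [ih hwf' _ _ true]
        cases hbs : bs.isEmpty with
        | true =>
          have hbsnil : bs = [] := List.isEmpty_iff.mp hbs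
          subst hbsnil
          cases int <;> cases ins <;>
            simp [pvProcA, finInt_cons, pvFlatten, ht, hf]
        | false =>
          cases int <;> cases ins <;>
            simp [pvProcA, finInt_cons, pvFlatten, ht, hf, hbs]

-- pvSplitBlocksW re-flattens to its input
lemma flatten_splitBlocks (ls : List String) : pvFlatten (pvSplitBlocksW ls) = ls := by
  induction ls using pvSplitBlocksW.induct with
  | case1 => simp [pvSplitBlocksW, pvFlatten]
  | case2 h rest ih =>
    rw [pvSplitBlocksW]
    simp only [pvFlatten, List.flatMap_cons]
    show h :: (rest.takeWhile _ ++ pvFlatten (pvSplitBlocksW (rest.dropWhile _))) = h :: rest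
    rw [ih, List.takeWhile_append_dropWhile]

-- pvSplitBlocksW yields well-formed blocks when its input starts with a heading (or is empty)
lemma wf_splitBlocks (ls : List String)
    (hhead : ∀ x, ls.head? = some x → pvIsHeading x = true) : pvWF (pvSplitBlocksW ls) := by
  induction ls using pvSplitBlocksW.induct with
  | case1 => intro b hb; simp [pvSplitBlocksW] at hb
  | case2 h rest ih =>
    rw [pvSplitBlocksW]
    intro b hb
    simp only [List.mem_cons] at hb
    rcases hb with rfl | hb
    · refine ⟨hhead h rfl, ?_⟩
      intro l hl
      have := List.mem_takeWhile_imp hl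
      simpa using this
    · refine ih ?_ b hb
      intro x hx
      have := List.head?_dropWhile_not (fun l => !pvIsHeading l) rest
      rw [hx] at this
      simpa using this

-- the fold over all lines equals A's own block-level stage
lemma foldA_lines (note : String) (lines : List String) :
    lines.foldl (pvStepA note) ([], false, false) =
      (lines.takeWhile (fun l => !pvIsHeading l) ++
         pvFlatten (pvProcA note false
           (pvSplitBlocksW (lines.dropWhile (fun l => !pvIsHeading l)))).1,
       (pvProcA note false
           (pvSplitBlocksW (lines.dropWhile (fun l => !pvIsHeading l)))).2,
       pvFinInt note false (pvSplitBlocksW (lines.dropWhile (fun l => !pvIsHeading l)))) := by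
  set pre := lines.takeWhile (fun l => !pvIsHeading l) with hpre
  set rest := lines.dropWhile (fun l => !pvIsHeading l) with hrest
  have hsplit : lines = pre ++ pvFlatten (pvSplitBlocksW rest) := by
    rw [flatten_splitBlocks, hpre, hrest, List.takeWhile_append_dropWhile]
  have hprewf : ∀ l ∈ pre, pvIsHeading l = false := by
    intro l hl
    have := List.mem_takeWhile_imp hl
    simpa using this
  have hwf : pvWF (pvSplitBlocksW rest) := by
    apply wf_splitBlocks
    intro x hx
    have := List.head?_dropWhile_not (fun l => !pvIsHeading l) lines
    rw [← hrest, hx] at this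
    simpa using this
  conv_lhs => rw [hsplit]
  rw [List.foldl_append, foldA_body_false note pre hprewf [] false, List.nil_append]
  rw [foldA_blocks note (pvSplitBlocksW rest) hwf pre false false]
  simp

-- outside the quirk region (or once done), A's and B's block processing agree
lemma procA_eq_procB (note : String) (bs : List (String × List String)) :
    ∀ done : Bool, (done = true ∨ pvQuirk bs = false) →
      pvProcA note done bs = pvProcB note done bs := by
  induction bs with
  | nil => intro done _; rfl
  | cons b bs ih =>
    intro done hq
    obtain ⟨h, body⟩ := b
    cases ht : pvIsTarget h with
    | false =>
      have hq' : done = true ∨ pvQuirk bs = false := by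
        rcases hq with h1 | h1
        · exact Or.inl h1
        · right; simpa [pvQuirk, ht] using h1
      simp [pvProcA, pvProcB, ht, ih done hq']
    | true =>
      cases hf : (pvReplaceNone note body).2 with
      | true => simp [pvProcA, pvProcB, ht, hf, ih true (Or.inl rfl)]
      | false =>
        cases hd : done with
        | true => simp [pvProcA, pvProcB, ht, hf, ih true (Or.inl rfl)]
        | false =>
          have hall : body.all (fun l => !pvIsNoneItem l) = true := by
            have := replaceNone_snd note body
            rw [hf] at this
            simpa using this.symm
          have hbs : bs.isEmpty = false := by
            rcases hq with h1 | h1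
            · exact absurd (hd ▸ h1) (by decide)
            · simpa [pvQuirk, ht, hall] using h1
          simp [pvProcA, pvProcB, ht, hf, hbs, ih true (Or.inl rfl)]

-- dropWhile skips a prefix whose elements all satisfy the predicate
lemma dropWhile_append_all {α : Type} (p : α → Bool) (as bs : List α)
    (h : ∀ x ∈ as, p x = true) :
    (as ++ bs).dropWhile p = bs.dropWhile p := by
  induction as with
  | nil => rfl
  | cons a as ih =>
    simp only [List.cons_append, List.dropWhile_cons, h a (by simp)]
    exact ih (fun x hx => h x (by simp [hx]))

-- the line-level D-condition, as used by D_append_note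
def pvDcond (ls : List String) : Prop :=
  let tl := ls.dropWhile (fun l => !(pvIsHeading l && pvIsTarget l))
  tl ≠ [] ∧ tl.tail.all (fun l => !pvIsHeading l) = true ∧
    tl.tail.all (fun l => !pvIsNoneItem l) = true

lemma beq_toList (s t : String) : (s == t) = (s.toList == t.toList) := by
  by_cases h : s = t
  · subst h; simp
  · have h1 : (s == t) = false := beq_eq_false_iff_ne.mpr h
    have h2 : (s.toList == t.toList) = false :=
      beq_eq_false_iff_ne.mpr (fun he => h (String.ext he))
    rw [h1, h2]

lemma pvDHead_eq (l : String) : pvDHead l = pvIsHeading l := by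
  unfold pvDHead pvIsHeading
  simp [PySem.Str.startswith]

lemma pvDTarget_eq (l : String) : pvDTarget l = (pvIsHeading l && pvIsTarget l) := by
  unfold pvDTarget pvIsTarget
  rw [pvDHead_eq, beq_toList]
  simp [PySem.Str.lower, PySem.Str.strip, PySem.Str.slice]

lemma pvDNone_eq (l : String) : pvDNone l = pvIsNoneItem l := by
  unfold pvDNone pvIsNoneItem
  rw [beq_toList]
  simp [PySem.Str.lower, PySem.Str.strip]

lemma Dcond_imp_D (markdown note : String)
    (h : pvDcond (PySem.Str.splitlines markdown)) : D_append_note markdown note := by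
  unfold pvDcond at h
  unfold D_append_note
  simp only [pvDTarget_eq, pvDHead_eq, pvDNone_eq]
  exact h

-- a true quirk flag at the block level certifies the line-level D-condition
lemma quirk_imp_Dcond (ls : List String)
    (hhead : ∀ x, ls.head? = some x → pvIsHeading x = true)
    (hq : pvQuirk (pvSplitBlocksW ls) = true) : pvDcond ls := by
  induction ls using pvSplitBlocksW.induct with
  | case1 => rw [pvSplitBlocksW] at hq; simp [pvQuirk] at hq
  | case2 h rest ih =>
    have hh : pvIsHeading h = true := hhead h rfl
    rw [pvSplitBlocksW] at hq
    cases ht : pvIsTarget h with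
    | true =>
      simp only [pvQuirk, ht, if_true, Bool.and_eq_true] at hq
      obtain ⟨hall, hemp⟩ := hq
      have hdnil : rest.dropWhile (fun l => !pvIsHeading l) = [] := by
        cases hd : rest.dropWhile (fun l => !pvIsHeading l) with
        | nil => rfl
        | cons y ys => rw [hd, pvSplitBlocksW] at hemp; simp at hemp
      have htake : rest.takeWhile (fun l => !pvIsHeading l) = rest := by
        have := List.takeWhile_append_dropWhile (p := fun l => !pvIsHeading l) (l := rest)
        rw [hdnil, List.append_nil] at this
        exact this
      rw [htake] at hall
      have hresth : rest.all (fun l => !pvIsHeading l) = true := by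
        have := List.dropWhile_eq_nil_iff.mp hdnil
        simp only [List.all_eq_true]
        intro x hx
        simpa using this x hx
      unfold pvDcond
      have hdrop : (h :: rest).dropWhile (fun l => !(pvIsHeading l && pvIsTarget l))
          = h :: rest := by
        rw [List.dropWhile_cons]
        simp [hh, ht]
      rw [hdrop]
      exact ⟨by simp, by simpa using hresth, by simpa using hall⟩
    | false =>
      simp only [pvQuirk, ht] at hq
      have hhead' : ∀ x, (rest.dropWhile (fun l => !pvIsHeading l)).head? = some x →
          pvIsHeading x = true := by
        intro x hx
        have := List.head?_dropWhile_not (fun l => !pvIsHeading l) rest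
        rw [hx] at this
        simpa using this
      have hD := ih hhead' hq
      -- transfer the D-condition from the dropped tail back to h :: rest
      unfold pvDcond at hD ⊢
      have e1 : (h :: rest).dropWhile (fun l => !(pvIsHeading l && pvIsTarget l))
          = rest.dropWhile (fun l => !(pvIsHeading l && pvIsTarget l)) := by
        rw [List.dropWhile_cons]
        simp [ht]
      have e2 : rest.dropWhile (fun l => !(pvIsHeading l && pvIsTarget l))
          = (rest.dropWhile (fun l => !pvIsHeading l)).dropWhile
              (fun l => !(pvIsHeading l && pvIsTarget l)) := by
        conv_lhs => rw [← List.takeWhile_append_dropWhile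
          (p := fun l => !pvIsHeading l) (l := rest)]
        apply dropWhile_append_all
        intro x hx
        have := List.mem_takeWhile_imp hx
        simp only [Bool.not_eq_eq_eq_not, Bool.not_true] at this ⊢
        simp [this]
      rw [e1, e2]
      exact hD

-- dropping to the first heading first does not change the first target-heading suffix
lemma drop_target_eq (ls : List String) :
    ls.dropWhile (fun l => !(pvIsHeading l && pvIsTarget l))
      = (ls.dropWhile (fun l => !pvIsHeading l)).dropWhile
          (fun l => !(pvIsHeading l && pvIsTarget l)) := by
  conv_lhs => rw [← List.takeWhile_append_dropWhile
    (p := fun l => !pvIsHeading l) (l := ls)]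
  apply dropWhile_append_all
  intro x hx
  have := List.mem_takeWhile_imp hx
  simp only [Bool.not_eq_eq_eq_not, Bool.not_true] at this ⊢
  simp [this]

-- D_append_note certified from the quirk flag on the post-preamble blocks
lemma quirk_imp_D (markdown note : String)
    (hq : pvQuirk (pvSplitBlocksW ((PySem.Str.splitlines markdown).dropWhile
            (fun l => !pvIsHeading l))) = true) :
    D_append_note markdown note := by
  set lines := PySem.Str.splitlines markdown with hlines
  have hhead' : ∀ x, (lines.dropWhile (fun l => !pvIsHeading l)).head? = some x →
      pvIsHeading x = true := by
    intro x hx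
    have := List.head?_dropWhile_not (fun l => !pvIsHeading l) lines
    rw [hx] at this
    simpa using this
  apply Dcond_imp_D
  have hD := quirk_imp_Dcond _ hhead' hq
  unfold pvDcond at hD
  unfold pvDcond
  rw [← hlines, drop_target_eq lines]
  exact hD

-- ===== further lemmas for the tightness theorem =====

lemma D_imp_Dcond (markdown note : String) (hD : D_append_note markdown note) :
    pvDcond (PySem.Str.splitlines markdown) := by
  unfold D_append_note at hD
  unfold pvDcond
  simp only [pvDTarget_eq, pvDHead_eq, pvDNone_eq] at hD
  exact hD

lemma Dcond_imp_quirk (ls : List String)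
    (hhead : ∀ x, ls.head? = some x → pvIsHeading x = true) (hD : pvDcond ls) :
    pvQuirk (pvSplitBlocksW ls) = true := by
  induction ls using pvSplitBlocksW.induct with
  | case1 =>
    unfold pvDcond at hD
    simp at hD
  | case2 h rest ih =>
    have hh : pvIsHeading h = true := hhead h rfl
    by_cases ht : pvIsTarget h = true
    · unfold pvDcond at hD
      have hstop : (h :: rest).dropWhile (fun l => !(pvIsHeading l && pvIsTarget l))
          = h :: rest := by
        rw [List.dropWhile_cons]
        simp [hh, ht]
      rw [hstop] at hD
      obtain ⟨-, hAllH, hAllN⟩ := hD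
      simp only [List.tail_cons, List.all_eq_true] at hAllH hAllN
      have hdw : rest.dropWhile (fun l => !pvIsHeading l) = [] := by
        rw [List.dropWhile_eq_nil_iff]
        intro x hx
        simpa using hAllH x hx
      have htw : rest.takeWhile (fun l => !pvIsHeading l) = rest := by
        have := List.takeWhile_append_dropWhile (p := fun l => !pvIsHeading l) (l := rest)
        rw [hdw, List.append_nil] at this
        exact this
      rw [pvSplitBlocksW, hdw, htw]
      rw [pvSplitBlocksW]
      simp only [pvQuirk, ht, if_true, List.isEmpty_nil, Bool.and_true, List.all_eq_true]
      intro x hx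
      simpa using hAllN x hx
    · have ht' : pvIsTarget h = false := by simpa using ht
      rw [pvSplitBlocksW]
      simp only [pvQuirk, ht']
      apply ih
      · intro x hx
        have := List.head?_dropWhile_not (fun l => !pvIsHeading l) rest
        rw [hx] at this
        simpa using this
      · unfold pvDcond at hD ⊢
        have h1 : (h :: rest).dropWhile (fun l => !(pvIsHeading l && pvIsTarget l))
            = rest.dropWhile (fun l => !(pvIsHeading l && pvIsTarget l)) := by
          rw [List.dropWhile_cons]
          simp [ht']
        rw [h1, drop_target_eq rest] at hD
        exact hD

lemma D_imp_quirk (markdown note : String) (hD : D_append_note markdown note) :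
    pvQuirk (pvSplitBlocksW ((PySem.Str.splitlines markdown).dropWhile
      (fun l => !pvIsHeading l))) = true := by
  apply Dcond_imp_quirk
  · intro x hx
    have := List.head?_dropWhile_not (fun l => !pvIsHeading l) (PySem.Str.splitlines markdown)
    rw [hx] at this
    simpa using this
  · have hDc := D_imp_Dcond markdown note hD
    unfold pvDcond at hDc ⊢
    rw [← drop_target_eq]
    exact hDc

-- inside the quirk region A leaves everything unchanged and inserts nothing
lemma procA_quirk (note : String) (bs : List (String × List String))
    (hq : pvQuirk bs = true) : pvProcA note false bs = (bs, false) := by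
  induction bs with
  | nil => simp [pvQuirk] at hq
  | cons b bs ih =>
    obtain ⟨h, body⟩ := b
    by_cases ht : pvIsTarget h = true
    · simp only [pvQuirk, ht, if_true, Bool.and_eq_true, List.isEmpty_iff] at hq
      obtain ⟨hall, rfl⟩ := hq
      have hf : (pvReplaceNone note body).2 = false := by
        rw [replaceNone_snd, hall]
        rfl
      simp [pvProcA, ht, hf]
    · have ht' : pvIsTarget h = false := by simpa using ht
      have hq' : pvQuirk bs = true := by simpa [pvQuirk, ht'] using hq
      simp [pvProcA, ht', ih hq']

-- inside the quirk region B appends the note to the (last) target block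
lemma procB_quirk (note : String) (bs : List (String × List String))
    (hq : pvQuirk bs = true) :
    pvFlatten (pvProcB note false bs).1 = pvFlatten bs ++ ["- " ++ note] ∧
      (pvProcB note false bs).2 = true := by
  induction bs with
  | nil => simp [pvQuirk] at hq
  | cons b bs ih =>
    obtain ⟨h, body⟩ := b
    by_cases ht : pvIsTarget h = true
    · simp only [pvQuirk, ht, if_true, Bool.and_eq_true, List.isEmpty_iff] at hq
      obtain ⟨hall, rfl⟩ := hq
      have hf : (pvReplaceNone note body).2 = false := by
        rw [replaceNone_snd, hall]
        rfl
      constructor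
      · simp [pvProcB, ht, hf, pvFlatten]
      · simp [pvProcB, ht, hf]
    · have ht' : pvIsTarget h = false := by simpa using ht
      have hq' : pvQuirk bs = true := by simpa [pvQuirk, ht'] using hq
      obtain ⟨ih1, ih2⟩ := ih hq'
      constructor
      · simp [pvProcB, ht', pvFlatten] at ih1 ⊢
        simp [ih1]
      · simp [pvProcB, ht', ih2]

-- rstrip facts at the character level
lemma rstrip_cons_nonws (c : Char) (cs : List Char)
    (h : PySem.Chars.isspace c = false) :
    PySem.Chars.rstrip (c :: cs) = c :: PySem.Chars.rstrip cs := by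
  unfold PySem.Chars.rstrip
  have : (c :: cs).reverse = cs.reverse ++ [c] := by simp
  rw [this, List.dropWhile_append]
  by_cases he : (cs.reverse.dropWhile PySem.Chars.isspace).isEmpty = true
  · rw [if_pos he]
    rw [List.isEmpty_iff] at he
    rw [he]
    simp [List.dropWhile, h]
  · rw [if_neg he]
    simp

lemma rstrip_cons_of_ne (c : Char) (cs : List Char)
    (h : PySem.Chars.rstrip cs ≠ []) :
    PySem.Chars.rstrip (c :: cs) = c :: PySem.Chars.rstrip cs := by
  unfold PySem.Chars.rstrip at h ⊢
  have hne : (cs.reverse.dropWhile PySem.Chars.isspace).isEmpty ≠ true := by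
    intro he
    rw [List.isEmpty_iff] at he
    rw [he] at h
    simp at h
  have : (c :: cs).reverse = cs.reverse ++ [c] := by simp
  rw [this, List.dropWhile_append, if_neg hne]
  simp

lemma rstrip_append (u v : List Char) (h : PySem.Chars.rstrip v ≠ []) :
    PySem.Chars.rstrip (u ++ v) = u ++ PySem.Chars.rstrip v := by
  unfold PySem.Chars.rstrip at h ⊢
  have hne : (v.reverse.dropWhile PySem.Chars.isspace).isEmpty ≠ true := by
    intro he
    rw [List.isEmpty_iff] at he
    rw [he] at h
    simp at h
  rw [List.reverse_append, List.dropWhile_append, if_neg hne]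
  simp

-- join over an appended nonempty block list
lemma join_append (sep : List Char) (xs ys : List (List Char))
    (hx : xs ≠ []) (hy : ys ≠ []) :
    PySem.Chars.join sep (xs ++ ys)
      = PySem.Chars.join sep xs ++ sep ++ PySem.Chars.join sep ys := by
  induction xs with
  | nil => exact absurd rfl hx
  | cons a t ih =>
    cases t with
    | nil =>
      cases ys with
      | nil => exact absurd rfl hy
      | cons y ys' =>
        rw [List.singleton_append, PySem.Chars.join_cons_cons, PySem.Chars.join_singleton]
    | cons b t' =>
      rw [List.cons_append, List.cons_append, PySem.Chars.join_cons_cons]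
      have hih := ih (by simp)
      rw [List.cons_append] at hih
      rw [hih, PySem.Chars.join_cons_cons]
      simp [List.append_assoc]

-- ===== VERDICT (by name: the statement is the Claim_ definition above) =====
theorem append_note_spec : Claim_unchanged_append_note := by
  intro markdown note _
  unfold Spec_append_note
  intro hnD
  unfold append_note append_note_alt
  simp only []
  rw [splitBlocks_eq_W]
  rw [foldA_lines note (PySem.Str.splitlines markdown)]
  have hq : pvQuirk (pvSplitBlocksW ((PySem.Str.splitlines markdown).dropWhile
      (fun l => !pvIsHeading l))) = false := by
    cases h : pvQuirk (pvSplitBlocksW ((PySem.Str.splitlines markdown).dropWhile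
        (fun l => !pvIsHeading l))) with
    | false => rfl
    | true => exact absurd (quirk_imp_D markdown note h) hnD
  rw [procA_eq_procB note _ false (Or.inr hq)]
  simp [pvFlatten]
  rfl

theorem append_note_changed : Claim_changed_append_note := by
  unfold Claim_changed_append_note
  decide

theorem append_note_tight : Claim_exact_append_note := by
  intro markdown note _ hD hEq
  set lines := PySem.Str.splitlines markdown with hlines
  set rest := lines.dropWhile (fun l => !pvIsHeading l) with hrest
  have hq : pvQuirk (pvSplitBlocksW rest) = true := D_imp_quirk markdown note hD
  have hrest_ne : rest ≠ [] := by
    intro h0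
    rw [h0, pvSplitBlocksW] at hq
    simp [pvQuirk] at hq
  have hlines_ne : lines ≠ [] := by
    intro h0
    apply hrest_ne
    rw [hrest, h0]
    rfl
  have hflat : lines.takeWhile (fun l => !pvIsHeading l) ++ pvFlatten (pvSplitBlocksW rest)
      = lines := by
    rw [flatten_splitBlocks, hrest, List.takeWhile_append_dropWhile]
  have hA : append_note markdown note
      = PySem.Str.rstrip (PySem.Str.join "\n"
          ((if lines ≠ [] ∧ lines.getLast? ≠ some "" then lines ++ [""] else lines)
            ++ ["## Notes For Next Round", "", "- " ++ note])) ++ "\n" := by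
    unfold append_note
    simp only []
    rw [← hlines, foldA_lines note lines, ← hrest, procA_quirk note _ hq]
    simp [hflat]
  have hB : append_note_alt markdown note
      = PySem.Str.rstrip (PySem.Str.join "\n" (lines ++ ["- " ++ note])) ++ "\n" := by
    unfold append_note_alt
    simp only []
    have hfl : ∀ (bs' : List (String × List String)),
        bs'.flatMap (fun b => b.1 :: b.2) = pvFlatten bs' := fun _ => rfl
    rw [← hlines, ← hrest, splitBlocks_eq_W]
    obtain ⟨hB1, hB2⟩ := procB_quirk note _ hq
    simp only [hfl]
    rw [hB2, hB1]
    simp [← List.append_assoc, hflat]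
  -- toList bridges
  have tl_rstrip : ∀ s : String, (PySem.Str.rstrip s).toList = PySem.Chars.rstrip s.toList := by
    intro s
    simp [PySem.Str.rstrip]
  have tl_join : ∀ parts : List String, (PySem.Str.join "\n" parts).toList
      = PySem.Chars.join ['\n'] (parts.map String.toList) := by
    intro parts
    simp [PySem.Str.join]
  have hnl : ("\n" : String).toList = ['\n'] := rfl
  have hmapne : lines.map String.toList ≠ [] := by simpa using hlines_ne
  have hdc : ("- " ++ note).toList = '-' :: ' ' :: note.toList := by
    rw [String.toList_append]
    rfl
  have hHc : ("## Notes For Next Round" : String).toList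
      = '#' :: '#' :: (" Notes For Next Round" : String).toList := rfl
  have hdashws : PySem.Chars.isspace '-' = false := by decide
  have hhashws : PySem.Chars.isspace '#' = false := by decide
  set u := PySem.Chars.join ['\n'] (lines.map String.toList) with hu
  -- B side in character form
  have hJB : PySem.Chars.join ['\n'] ((lines ++ ["- " ++ note]).map String.toList)
      = u ++ '\n' :: '-' :: ' ' :: note.toList := by
    rw [List.map_append, join_append ['\n'] _ _ hmapne (by simp)]
    simp [PySem.Chars.join_singleton, hdc, List.append_assoc, ← hu]
  have hrw : PySem.Chars.rstrip ('-' :: ' ' :: note.toList)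
      = '-' :: PySem.Chars.rstrip (' ' :: note.toList) := rstrip_cons_nonws _ _ hdashws
  have hRB : PySem.Chars.rstrip (PySem.Chars.join ['\n']
        ((lines ++ ["- " ++ note]).map String.toList))
      = u ++ '\n' :: '-' :: PySem.Chars.rstrip (' ' :: note.toList) := by
    rw [hJB, rstrip_append _ _ (by rw [rstrip_cons_of_ne _ _ (by rw [hrw]; simp)]; simp),
      rstrip_cons_of_ne _ _ (by rw [hrw]; simp), hrw]
  rw [hA, hB] at hEq
  have tl := congrArg String.toList hEq
  rw [String.toList_append, String.toList_append, tl_rstrip, tl_rstrip, tl_join, tl_join] at tl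
  have tl2 := List.append_cancel_right tl
  rw [hRB] at tl2
  by_cases hpad : lines.getLast? ≠ some ""
  · rw [if_pos ⟨hlines_ne, hpad⟩] at tl2
    have hJA : PySem.Chars.join ['\n'] (((lines ++ [""])
          ++ ["## Notes For Next Round", "", "- " ++ note]).map String.toList)
        = u ++ '\n' :: '\n' :: ('#' :: '#' :: ((" Notes For Next Round" : String).toList
            ++ '\n' :: '\n' :: '-' :: ' ' :: note.toList)) := by
      rw [List.append_assoc, List.map_append, join_append ['\n'] _ _ hmapne (by simp)]
      simp [PySem.Chars.join_cons_cons, PySem.Chars.join_singleton, hdc, hHc,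
        List.append_assoc, ← hu]
    rw [hJA] at tl2
    rw [rstrip_append _ _ (by
        rw [rstrip_cons_of_ne _ _ (by rw [rstrip_cons_of_ne _ _ (by
          rw [rstrip_cons_nonws _ _ hhashws]; simp)]; simp)]
        simp)] at tl2
    rw [rstrip_cons_of_ne _ _ (by rw [rstrip_cons_of_ne _ _ (by
        rw [rstrip_cons_nonws _ _ hhashws]; simp)]; simp)] at tl2
    rw [rstrip_cons_of_ne _ _ (by rw [rstrip_cons_nonws _ _ hhashws]; simp)] at tl2
    have := List.append_cancel_left tl2
    simp at this
  · rw [if_neg (by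
        intro hcon
        exact hpad hcon.2)] at tl2
    have hJA : PySem.Chars.join ['\n'] ((lines
          ++ ["## Notes For Next Round", "", "- " ++ note]).map String.toList)
        = u ++ '\n' :: ('#' :: '#' :: ((" Notes For Next Round" : String).toList
            ++ '\n' :: '\n' :: '-' :: ' ' :: note.toList)) := by
      rw [List.map_append, join_append ['\n'] _ _ hmapne (by simp)]
      simp [PySem.Chars.join_cons_cons, PySem.Chars.join_singleton, hdc, hHc,
        List.append_assoc, ← hu]
    rw [hJA] at tl2
    rw [rstrip_append _ _ (by
        rw [rstrip_cons_of_ne _ _ (by rw [rstrip_cons_nonws _ _ hhashws]; simp)]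
        simp)] at tl2
    rw [rstrip_cons_of_ne _ _ (by rw [rstrip_cons_nonws _ _ hhashws]; simp)] at tl2
    rw [rstrip_cons_nonws _ _ hhashws] at tl2
    have := List.append_cancel_left tl2
    simp at this
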